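-- pv_equiv track=rewrite | github.com/ahos1215-coder/riental-lounge-monitor | scripts/experiments/ablation_signal_extraction.py | _build_sets
-- ===== SOURCE A (Python) =====
-- def _build_sets(feature_cols: list[str]) -> dict[str, list[str]]:
--     ma_cols = [c for c in feature_cols if c.startswith("men_ma_") or c.startswith("women_ma_")]
--     lag_cols = [c for c in feature_cols if c.startswith("men_lag_") or c.startswith("women_lag_")]
--     ar_now = ["gender_diff"]
--     full = feature_cols.copy()
--     no_ma = [c for c in full if c not in set(ma_cols)]
--     no_ar = [c for c in full if c not in set(ma_cols + lag_cols + ar_now)]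
--     return {"full": full, "no_ma": no_ma, "no_autoregressive": no_ar}
-- ===== SOURCE B (Python) =====
-- def _build_sets(feature_cols: list[str]) -> dict[str, list[str]]:
--     full, no_ma, no_ar = [], [], []
--     for c in feature_cols:
--         is_ma = c.startswith("men_ma_") or c.startswith("women_ma_")
--         is_lag = c.startswith("men_lag_") or c.startswith("women_lag_")
--         full.append(c)
--         if not is_ma:
--             no_ma.append(c)
--             if not is_lag and c != "gender_diff":
--                 no_ar.append(c)
--     return {"full": full, "no_ma": no_ma, "no_autoregressive": no_ar}
-- ===== Notes on version B (the rewrite author's own statement) =====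
-- stated objective: simpler
-- what changed: Replaces A's five list comprehensions plus two materialised prefix lists and set-membership tests with one pass that classifies each column by its prefixes directly and appends it to the relevant output lists.
import Mathlib
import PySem

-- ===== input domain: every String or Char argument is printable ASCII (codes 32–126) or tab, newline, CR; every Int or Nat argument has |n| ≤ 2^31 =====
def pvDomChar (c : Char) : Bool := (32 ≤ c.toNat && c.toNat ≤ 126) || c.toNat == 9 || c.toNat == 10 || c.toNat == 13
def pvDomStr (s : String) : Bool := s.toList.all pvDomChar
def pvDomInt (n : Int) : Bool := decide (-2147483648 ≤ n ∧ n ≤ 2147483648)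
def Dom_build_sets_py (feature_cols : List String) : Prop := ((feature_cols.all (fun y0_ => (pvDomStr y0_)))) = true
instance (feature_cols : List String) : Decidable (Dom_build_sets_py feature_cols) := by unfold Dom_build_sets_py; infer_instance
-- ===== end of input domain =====

-- B replaces A's multiple comprehensions and materialised ma/lag lists with one pass
-- classifying each column by its prefixes directly (objective: simpler).

-- ===== PORT A =====
def build_sets_py (feature_cols : List String) : List (String × List String) :=
  let ma_cols := feature_cols.filter (fun c =>
    PySem.Str.startswith c "men_ma_" || PySem.Str.startswith c "women_ma_")
  let lag_cols := feature_cols.filter (fun c =>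
    PySem.Str.startswith c "men_lag_" || PySem.Str.startswith c "women_lag_")
  let ar_now := ["gender_diff"]
  let full := feature_cols
  let no_ma := full.filter (fun c => !(PySem.Set.contains (PySem.Set.ofList ma_cols) c))
  let no_ar := full.filter (fun c =>
    !(PySem.Set.contains (PySem.Set.ofList (ma_cols ++ lag_cols ++ ar_now)) c))
  [("full", full), ("no_ma", no_ma), ("no_autoregressive", no_ar)]

-- ===== PORT B =====
-- one loop over feature_cols, carried state = the three output lists (built back-to-front here)
def buildSetsLoop : List String → List String × List String × List String
  | [] => ([], [], [])
  | c :: rest =>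
    let is_ma := PySem.Str.startswith c "men_ma_" || PySem.Str.startswith c "women_ma_"
    let is_lag := PySem.Str.startswith c "men_lag_" || PySem.Str.startswith c "women_lag_"
    let (full, no_ma, no_ar) := buildSetsLoop rest
    (c :: full,
     if is_ma then no_ma else c :: no_ma,
     if !is_ma then (if !is_lag && c != "gender_diff" then c :: no_ar else no_ar) else no_ar)

def build_sets_py_alt (feature_cols : List String) : List (String × List String) :=
  let (full, no_ma, no_ar) := buildSetsLoop feature_cols
  [("full", full), ("no_ma", no_ma), ("no_autoregressive", no_ar)]

-- ===== PRECONDITION & SPEC =====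
def Spec_build_sets_py (feature_cols : List String) (out : List (String × List String)) : Prop := out = build_sets_py_alt feature_cols
instance (feature_cols : List String) (out : List (String × List String)) : Decidable (Spec_build_sets_py feature_cols out) := by unfold Spec_build_sets_py; infer_instance

-- ===== CLAIM (what is proved, stated in full; the proofs are below) =====
def Claim_equal_build_sets_py : Prop := ∀ (feature_cols : List String), Dom_build_sets_py feature_cols → Spec_build_sets_py feature_cols (build_sets_py feature_cols)

-- ===== LEMMAS AND PROOFS =====

def maP (c : String) : Bool :=
  PySem.Str.startswith c "men_ma_" || PySem.Str.startswith c "women_ma_"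
def lagP (c : String) : Bool :=
  PySem.Str.startswith c "men_lag_" || PySem.Str.startswith c "women_lag_"

-- B's loop computes the full list and the two filtered lists
theorem buildSetsLoop_eq (l : List String) :
    buildSetsLoop l =
      (l, l.filter (fun c => !maP c),
          l.filter (fun c => !maP c && (!lagP c && c != "gender_diff"))) := by
  induction l with
  | nil => rfl
  | cons c rest ih =>
    simp only [buildSetsLoop, ih, List.filter_cons, maP, lagP]
    cases h1 : PySem.Str.startswith c "men_ma_" <;>
    cases h2 : PySem.Str.startswith c "women_ma_" <;>
    cases h3 : PySem.Str.startswith c "men_lag_" <;>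
    cases h4 : PySem.Str.startswith c "women_lag_" <;>
    cases h5 : c == "gender_diff" <;> simp

-- membership in set(ma_cols) for an element of feature_cols is just the prefix test
theorem mem_filter_iff_pred (p : String → Bool) (l : List String) (c : String) (hc : c ∈ l) :
    PySem.Set.contains (PySem.Set.ofList (l.filter p)) c = p c := by
  rw [Bool.eq_iff_iff]
  simp [PySem.Set.mem_ofList, List.mem_filter, hc]

-- ===== VERDICT (by name: the statement is the Claim_ definition above) =====
theorem build_sets_py_spec : Claim_equal_build_sets_py := by
  intro fc _
  show build_sets_py fc = build_sets_py_alt fc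
  unfold build_sets_py build_sets_py_alt
  rw [buildSetsLoop_eq]
  simp only [List.cons.injEq, Prod.mk.injEq, and_true, true_and]
  constructor
  · apply List.filter_congr
    intro c hc
    rw [mem_filter_iff_pred _ _ _ hc]
    rfl
  · apply List.filter_congr
    intro c hc
    rw [Bool.eq_iff_iff]
    simp [PySem.Set.mem_ofList, List.mem_filter, hc, maP, lagP]
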